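-- pv_equiv track=rewrite | github.com/zfhrp6/competitive-programming | atcoder/agc021_a.py | calc
-- ===== SOURCE A (Python) =====
-- def calc(N):
--     if len(str(N)) == 1:
--         return N
--     if len(list(set(str(N)[1:]))) == 1 and '9' in  list(set(str(N)[1:])):
--         return int(str(N)[0])+9*len(str(N)[1:])
--     ret = 0
--     f = 0
--     for idx,c in enumerate(str(N)):
--         tmp = int(c)
--         if f == 1:
--             ret += 9
--             continue
--         if tmp != 9 and idx == 0:
--             ret += tmp-1
--             f = 1
--             continue
--         elif tmp != 9:
--             ret -= 1
--             f = 1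
--             ret += 9
--             continue
--         else:
--             ret += 9
--             continue
--     return ret
-- ===== SOURCE B (Python) =====
-- def calc(N):
--     s = str(N)
--     digitsum = sum(int(c) for c in s)
--     lower = (int(s[0]) - 1) + 9 * (len(s) - 1)
--     return max(digitsum, lower)
-- ===== Notes on version B (the rewrite author's own statement) =====
-- stated objective: simpler
-- what changed: Replaces A's stateful flag-carrying digit loop plus its separate all-9s-tail special case by directly computing the two candidate sums (the digit sum of N, and (first digit - 1) + 9*(number of remaining digits)) and returning their maximum.
import Mathlib
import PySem

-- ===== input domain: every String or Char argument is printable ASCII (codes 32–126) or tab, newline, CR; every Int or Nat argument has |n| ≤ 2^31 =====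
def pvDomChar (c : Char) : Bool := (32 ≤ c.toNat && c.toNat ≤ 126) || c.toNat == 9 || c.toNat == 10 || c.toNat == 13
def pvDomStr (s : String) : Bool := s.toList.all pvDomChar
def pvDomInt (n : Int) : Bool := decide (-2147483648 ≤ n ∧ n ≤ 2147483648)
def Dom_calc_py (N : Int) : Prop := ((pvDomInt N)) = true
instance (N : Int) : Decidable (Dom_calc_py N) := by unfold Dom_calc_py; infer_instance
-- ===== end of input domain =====

-- B replaces A's stateful flag loop and all-9s special case by max(digit sum, (first digit-1)+9*(len-1)); same behaviour, simpler.


-- ===== PORT A =====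
-- int(c) for a one-character string c; for N ≥ 0 (Pre_) every character of str(N) is a
-- decimal digit, so Python's int() never raises here and the `.getD 0` default is unreachable.
def digitValA (c : Char) : Int := (PySem.Int.ofChars? [c]).getD 0

-- the `for idx, c in enumerate(str(N))` loop, state = (idx, f, ret)
def loopA (cs : List Char) (idx : Nat) (f ret : Int) : Int :=
  match cs with
  | [] => ret
  | c :: rest =>
    let tmp := digitValA c
    if f = 1 then loopA rest (idx + 1) f (ret + 9)
    else if tmp ≠ 9 ∧ idx = 0 then loopA rest (idx + 1) 1 (ret + (tmp - 1))
    else if tmp ≠ 9 then loopA rest (idx + 1) 1 (ret - 1 + 9)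
    else loopA rest (idx + 1) f (ret + 9)

-- str(N)[0] via headD: str(N) is never empty, so the ' ' default is unreachable
def calc_py (N : Int) : Int :=
  let s := PySem.Int.toChars N
  if s.length = 1 then N
  else if (PySem.Set.ofList (s.drop 1)).length = 1 ∧ '9' ∈ PySem.Set.ofList (s.drop 1) then
    digitValA (s.headD ' ') + 9 * ((s.drop 1).length : Int)
  else loopA s 0 0 0

-- ===== PORT B =====
-- same remark as digitValA: on Pre_ every character is a digit, int() never raises
def digitValB (c : Char) : Int := (PySem.Int.ofChars? [c]).getD 0

def calc_py_alt (N : Int) : Int :=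
  let s := PySem.Int.toChars N
  let digitsum := s.foldl (fun a c => a + digitValB c) 0
  let lower := (digitValB (s.headD ' ') - 1) + 9 * ((s.length : Int) - 1)
  max digitsum lower

-- ===== PRECONDITION & SPEC =====
-- For N < 0, str(N) starts with '-' and both A and B raise ValueError at int('-').
def Pre_calc_py (N : Int) : Prop := 0 ≤ N
instance (N : Int) : Decidable (Pre_calc_py N) := by unfold Pre_calc_py; infer_instance
def pvWitness_calc_py : Int := 19

def Spec_calc_py (N : Int) (out : Int) : Prop := out = calc_py_alt N
instance (N : Int) (out : Int) : Decidable (Spec_calc_py N out) := by unfold Spec_calc_py; infer_instance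

-- ===== CLAIM (what is proved, stated in full; the proofs are below) =====
def Claim_equal_calc_py : Prop := ∀ (N : Int), Dom_calc_py N → Pre_calc_py N → Spec_calc_py N (calc_py N)

-- ===== LEMMAS AND PROOFS =====

-- the ten decimal digit characters
def pvDigits : List Char := ['0', '1', '2', '3', '4', '5', '6', '7', '8', '9']

lemma pv_digitChar_mem {m : Nat} (h : m < 10) : Nat.digitChar m ∈ pvDigits := by
  interval_cases m <;> decide

lemma pv_tdc_digits (f : Nat) : ∀ (n : Nat) (acc : List Char), (∀ c ∈ acc, c ∈ pvDigits) →
    ∀ c ∈ Nat.toDigitsCore 10 f n acc, c ∈ pvDigits := by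
  induction f with
  | zero => intro n acc hacc; simpa [Nat.toDigitsCore] using hacc
  | succ f ih =>
    intro n acc hacc
    simp only [Nat.toDigitsCore]
    split
    · intro c hc
      rcases List.mem_cons.mp hc with h | h
      · exact h ▸ pv_digitChar_mem (Nat.mod_lt _ (by omega))
      · exact hacc _ h
    · exact ih _ _ (by
        intro c hc
        rcases List.mem_cons.mp hc with h | h
        · exact h ▸ pv_digitChar_mem (Nat.mod_lt _ (by omega))
        · exact hacc _ h)

lemma pv_toDigits_digits (n : Nat) : ∀ c ∈ Nat.toDigits 10 n, c ∈ pvDigits :=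
  pv_tdc_digits (n + 1) n [] (by simp)

lemma pv_tdc_len (f : Nat) : ∀ (n : Nat) (acc : List Char),
    acc.length + 1 ≤ (Nat.toDigitsCore 10 (f + 1) n acc).length := by
  induction f with
  | zero => intro n acc; simp only [Nat.toDigitsCore]; split <;> simp
  | succ f ih =>
    intro n acc
    simp only [Nat.toDigitsCore]
    split
    · simp
    · calc acc.length + 1 ≤ (Nat.digitChar (n % 10) :: acc).length + 1 := by simp
        _ ≤ _ := ih _ _

lemma pv_toDigits_big {n : Nat} (h : 10 ≤ n) : 2 ≤ (Nat.toDigits 10 n).length := by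
  have hne : n / 10 ≠ 0 := by omega
  have h1 : Nat.toDigits 10 n = Nat.toDigitsCore 10 n (n / 10) [Nat.digitChar (n % 10)] := by
    simp only [Nat.toDigits, Nat.toDigitsCore]
    split
    · omega
    · rfl
  rw [h1]
  have := pv_tdc_len (n - 1) (n / 10) [Nat.digitChar (n % 10)]
  rw [Nat.sub_add_cancel (by omega : 1 ≤ n)] at this
  simpa using this

lemma pv_dv_bounds {c : Char} (h : c ∈ pvDigits) : 0 ≤ digitValA c ∧ digitValA c ≤ 9 := by
  fin_cases h <;> decide

lemma pv_dv_nine {c : Char} (h : c ∈ pvDigits) (h9 : digitValA c = 9) : c = '9' := by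
  fin_cases h <;> first | rfl | (exfalso; revert h9; decide)

lemma pv_dvB_eq (c : Char) : digitValB c = digitValA c := rfl

lemma pv_loopA_flag (cs : List Char) : ∀ (idx : Nat) (ret : Int),
    loopA cs idx 1 ret = ret + 9 * cs.length := by
  induction cs with
  | nil => intro idx ret; simp [loopA]
  | cons c rest ih =>
    intro idx ret
    simp only [loopA, if_true]
    rw [ih]
    simp only [List.length_cons]
    push_cast
    ring

lemma pv_loopA_inner (cs : List Char) : ∀ (idx : Nat) (ret : Int), idx ≠ 0 →
    (∀ c ∈ cs, c ∈ pvDigits) → (∃ c ∈ cs, c ≠ '9') →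
    loopA cs idx 0 ret = ret + 9 * cs.length - 1 := by
  induction cs with
  | nil => intro _ _ _ _ h; simp at h
  | cons c rest ih =>
    intro idx ret hidx hd hex
    simp only [loopA]
    rw [if_neg (by norm_num)]
    rw [if_neg (by intro ⟨_, h⟩; exact hidx h)]
    by_cases h9 : digitValA c = 9
    · rw [if_neg (by simp [h9])]
      have hc9 : c = '9' := pv_dv_nine (hd c (by simp)) h9
      obtain ⟨d, hd1, hd2⟩ := hex
      rcases List.mem_cons.mp hd1 with h | h
      · exact absurd (h ▸ hc9) hd2
      · rw [ih _ _ (by omega) (fun x hx => hd x (by simp [hx])) ⟨d, h, hd2⟩]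
        simp only [List.length_cons]; push_cast; ring
    · rw [if_pos h9, pv_loopA_flag]
      simp only [List.length_cons]; push_cast; ring

lemma pv_foldl_dsum (cs : List Char) : ∀ (x : Int),
    cs.foldl (fun a c => a + digitValB c) x = x + (cs.map digitValA).sum := by
  induction cs with
  | nil => intro x; simp
  | cons c rest ih => intro x; simp only [List.foldl, List.map, List.sum_cons]; rw [ih, pv_dvB_eq]; ring

lemma pv_sum_all9 (cs : List Char) (h : ∀ c ∈ cs, c = '9') :
    (cs.map digitValA).sum = 9 * cs.length := by
  induction cs with
  | nil => simp
  | cons c rest ih =>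
    have hc : c = '9' := h c (by simp)
    have h9 : digitValA '9' = 9 := by decide
    rw [List.map_cons, List.sum_cons, ih (fun x hx => h x (by simp [hx])), hc, h9]
    simp only [List.length_cons]; push_cast; ring

lemma pv_sum_le9 (cs : List Char) (hd : ∀ c ∈ cs, c ∈ pvDigits) :
    (cs.map digitValA).sum ≤ 9 * cs.length := by
  induction cs with
  | nil => simp
  | cons c rest ih =>
    rw [List.map_cons, List.sum_cons]
    have h1 := pv_dv_bounds (hd c (by simp))
    have h2 := ih (fun x hx => hd x (by simp [hx]))
    simp only [List.length_cons]
    push_cast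
    push_cast at h2
    omega

lemma pv_sum_le (cs : List Char) (hd : ∀ c ∈ cs, c ∈ pvDigits) (hex : ∃ c ∈ cs, c ≠ '9') :
    (cs.map digitValA).sum ≤ 9 * cs.length - 1 := by
  induction cs with
  | nil => simp at hex
  | cons c rest ih =>
    rw [List.map_cons, List.sum_cons]
    obtain ⟨d, hd1, hd2⟩ := hex
    have hbc := pv_dv_bounds (hd c (by simp))
    simp only [List.length_cons]
    rcases List.mem_cons.mp hd1 with h | h
    · have hc8 : digitValA c ≤ 8 := by
        rcases lt_or_eq_of_le hbc.2 with hlt | heq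
        · omega
        · exact absurd (pv_dv_nine (hd c (by simp)) heq) (h ▸ hd2)
      have hsum_le := pv_sum_le9 rest (fun x hx => hd x (by simp [hx]))
      push_cast
      push_cast at hsum_le
      omega
    · have := ih (fun x hx => hd x (by simp [hx])) ⟨d, h, hd2⟩
      push_cast
      push_cast at this
      omega

lemma pv_set_all9 {t : List Char} (ht : t ≠ []) (h : ∀ c ∈ t, c = '9') :
    PySem.Set.ofList t = ['9'] := by
  have hmem : ∀ c, c ∈ PySem.Set.ofList t ↔ c ∈ t := fun c => PySem.Set.mem_ofList t c
  have hnd : (PySem.Set.ofList t).Nodup := PySem.Set.nodup_ofList t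
  match hS : PySem.Set.ofList t with
  | [] =>
    obtain ⟨c, hc⟩ := List.exists_mem_of_ne_nil t ht
    have := (hmem c).mpr hc
    rw [hS] at this
    simp at this
  | [a] =>
    have : a ∈ t := (hmem a).mp (by simp [hS])
    rw [h a this]
  | a :: b :: r =>
    rw [hS] at hmem hnd
    have ha : a = '9' := h a ((hmem a).mp (by simp))
    have hb : b = '9' := h b ((hmem b).mp (by simp))
    rw [ha, hb] at hnd
    simp at hnd

lemma pv_set_not_all9 {t : List Char} (hex : ∃ c ∈ t, c ≠ '9')
    (h : (PySem.Set.ofList t).length = 1 ∧ '9' ∈ PySem.Set.ofList t) : False := by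
  obtain ⟨c, hc, hc9⟩ := hex
  obtain ⟨h1, h2⟩ := h
  have hcS : c ∈ PySem.Set.ofList t := (PySem.Set.mem_ofList t c).mpr hc
  match hS : PySem.Set.ofList t with
  | [] => rw [hS] at h1; simp at h1
  | [a] =>
    rw [hS] at hcS h2
    simp at hcS h2
    exact hc9 (hcS.trans h2.symm)
  | a :: b :: r => rw [hS] at h1; simp at h1

-- the combinational heart: for any string of ≥ 2 digit characters, A's else-part equals B's body
lemma pv_main (s : List Char) (h2 : 2 ≤ s.length) (hd : ∀ c ∈ s, c ∈ pvDigits) :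
    (if (PySem.Set.ofList (s.drop 1)).length = 1 ∧ '9' ∈ PySem.Set.ofList (s.drop 1) then
      digitValA (s.headD ' ') + 9 * ((s.drop 1).length : Int)
    else loopA s 0 0 0)
    = max (s.foldl (fun a c => a + digitValB c) 0)
        ((digitValB (s.headD ' ') - 1) + 9 * ((s.length : Int) - 1)) := by
  match s with
  | [] => simp at h2
  | [c] => simp at h2
  | c0 :: c1 :: rest =>
    set t := c1 :: rest with ht
    have htne : t ≠ [] := by simp [ht]
    have hdt : ∀ c ∈ t, c ∈ pvDigits := fun c hc => hd c (by simp [ht] at hc ⊢; tauto)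
    have hd0 := pv_dv_bounds (hd c0 (by simp))
    simp only [List.headD, List.drop_one, List.tail_cons]
    rw [pv_foldl_dsum, List.map_cons, List.sum_cons]
    by_cases hall : ∀ c ∈ t, c = '9'
    · rw [if_pos (by rw [pv_set_all9 htne hall]; simp)]
      rw [pv_sum_all9 t hall, pv_dvB_eq]
      have hlen : ((c0 :: t).length : Int) - 1 = (t.length : Int) := by
        simp only [List.length_cons]; push_cast; ring
      rw [hlen]
      have : digitValA c0 - 1 + 9 * (t.length : Int) ≤ 0 + (digitValA c0 + 9 * (t.length : Int)) := by omega
      omega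
    · have hex : ∃ c ∈ t, c ≠ '9' := by
        simpa using hall
      rw [if_neg (fun h => pv_set_not_all9 hex h)]
      have hsum := pv_sum_le t hdt hex
      have hlen : ((c0 :: t).length : Int) - 1 = (t.length : Int) := by
        simp only [List.length_cons]; push_cast; ring
      rw [hlen, pv_dvB_eq]
      have hloop : loopA (c0 :: t) 0 0 0 = digitValA c0 - 1 + 9 * (t.length : Int) := by
        simp only [loopA]
        rw [if_neg (by norm_num)]
        by_cases h9 : digitValA c0 = 9
        · rw [if_neg (by simp [h9]), if_neg (by simp [h9])]
          rw [pv_loopA_inner t 1 _ (by omega) hdt hex]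
          omega
        · rw [if_pos ⟨h9, trivial⟩, pv_loopA_flag]
          ring
      rw [hloop]
      have : 0 + (digitValA c0 + (t.map digitValA).sum) ≤ digitValA c0 - 1 + 9 * (t.length : Int) := by omega
      omega

lemma pv_toChars_nonneg {N : Int} (h : 0 ≤ N) :
    PySem.Int.toChars N = Nat.toDigits 10 N.toNat := by
  simp [PySem.Int.toChars, not_lt.mpr h]

-- ===== VERDICT (by name: the statement is the Claim_ definition above) =====
theorem calc_py_spec : Claim_equal_calc_py := by
  intro N _ hpre
  unfold Spec_calc_py
  have hpre' : (0 : Int) ≤ N := hpre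
  obtain ⟨n, rfl⟩ : ∃ n : Nat, N = (n : Int) := ⟨N.toNat, (Int.toNat_of_nonneg hpre').symm⟩
  have hs : PySem.Int.toChars (n : Int) = Nat.toDigits 10 n := by
    rw [pv_toChars_nonneg hpre']; simp
  by_cases hn : n < 10
  · interval_cases n <;> decide
  · unfold calc_py calc_py_alt
    rw [hs]
    have h2 := pv_toDigits_big (by omega : 10 ≤ n)
    rw [if_neg (by omega)]
    exact pv_main _ h2 (pv_toDigits_digits n)
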